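-- pv_equiv track=rewrite | github.com/Dudusegovia/least_squares_method | mmq_regressor.py | _tipos_de_soma
-- ===== SOURCE A (Python) =====
-- def _tipos_de_soma(x, exp, maior_exp=None):
--     """Gera as somas das potências de X para a Matriz de Vandermonde."""
--     if maior_exp is None:
--         maior_exp = exp
--
--     lista_tipos = [[] for _ in range(len(x))]
--     for i in range(len(x)):
--         for j in range(exp + 1):
--             lista_tipos[i].append((x[i] ** maior_exp) * (x[i] ** (exp - j)))
--
--     lista_final = []
--     if not lista_tipos:
--         return lista_final
--
--     for j in range(len(lista_tipos[0])):
--         soma = 0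
--         for i in range(len(lista_tipos)):
--             soma += lista_tipos[i][j]
--         lista_final.append(soma)
--
--     return lista_final
-- ===== SOURCE B (Python) =====
-- def _tipos_de_soma(x, exp, maior_exp=None):
--     """Gera as somas das potencias de X para a Matriz de Vandermonde.
--
--     Single accumulating pass: no intermediate matrix, no column-summing phase.
--     Keeps the exact two-factor product expression of the original.
--     """
--     if maior_exp is None:
--         maior_exp = exp
--     if not x:
--         return []
--     lista_final = [0] * (exp + 1)
--     for xi in x:
--         lista_final = [s + (xi ** maior_exp) * (xi ** (exp - j))
--                        for j, s in enumerate(lista_final)]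
--     return lista_final
-- ===== Notes on version B (the rewrite author's own statement) =====
-- stated objective: simpler
-- what changed: B drops A's intermediate row matrix and its second column-summing phase, keeping one running list of power sums updated once per element of x.
-- outside the precondition, e.g. on _tipos_de_soma([2], 1, -1): A returns [1.0, 0.5], B returns [1.0, 0.5]
import Mathlib
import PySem

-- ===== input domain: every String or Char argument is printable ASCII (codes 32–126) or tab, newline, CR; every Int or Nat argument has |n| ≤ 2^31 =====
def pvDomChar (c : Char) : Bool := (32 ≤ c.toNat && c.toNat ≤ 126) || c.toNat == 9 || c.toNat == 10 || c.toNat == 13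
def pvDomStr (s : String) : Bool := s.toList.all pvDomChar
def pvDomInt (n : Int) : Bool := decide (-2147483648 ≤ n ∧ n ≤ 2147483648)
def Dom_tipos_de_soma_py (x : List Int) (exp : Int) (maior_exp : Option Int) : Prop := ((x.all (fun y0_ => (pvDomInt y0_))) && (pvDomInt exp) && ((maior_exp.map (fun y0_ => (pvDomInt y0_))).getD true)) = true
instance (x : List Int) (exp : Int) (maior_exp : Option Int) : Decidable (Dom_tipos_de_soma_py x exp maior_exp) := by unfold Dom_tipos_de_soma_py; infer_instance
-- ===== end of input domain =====

-- B replaces A's intermediate row matrix + separate column-summing phase by one running list of sums; objective: simpler.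

-- ===== PORT A =====
-- A-side helper: the 'lista_tipos' row matrix. Python initialises n empty rows and, in
-- iteration i, appends only to row i, so building it as a map over range(len(x)) of the
-- append loop is the same computation row for row.
def pvRowsA (x : List Int) (exp : Int) (me : Int) : List (List Int) :=
  (PySem.List.pyRange 0 (x.length : Int) 1).map (fun i =>
    (PySem.List.pyRange 0 (exp + 1) 1).foldl (fun row j =>
      row ++ [PySem.List.pyGetD x i 0 ^ me.toNat * PySem.List.pyGetD x i 0 ^ (exp - j).toNat]) [])

def tipos_de_soma_py (x : List Int) (exp : Int) (maior_exp : Option Int) : List Int :=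
  if pvRowsA x exp (maior_exp.getD exp) = [] then []
  else
    (PySem.List.pyRange 0 ((PySem.List.pyGetD (pvRowsA x exp (maior_exp.getD exp)) 0 []).length : Int) 1).foldl
      (fun lf j =>
        lf ++ [(PySem.List.pyRange 0 ((pvRowsA x exp (maior_exp.getD exp)).length : Int) 1).foldl
          (fun soma i =>
            soma + PySem.List.pyGetD (PySem.List.pyGetD (pvRowsA x exp (maior_exp.getD exp)) i []) j 0) 0]) []

-- ===== PORT B =====
def tipos_de_soma_py_alt (x : List Int) (exp : Int) (maior_exp : Option Int) : List Int :=
  if x = [] then []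
  else
    x.foldl (fun lf xi =>
      (PySem.List.enumerate lf 0).map (fun js =>
        js.2 + xi ^ (maior_exp.getD exp).toNat * xi ^ (exp - js.1).toNat))
      (List.replicate (exp + 1).toNat 0)

-- ===== PRECONDITION & SPEC =====
-- Pre_ excludes inputs with a negative effective exponent reached by a nonempty x and
-- exp ≥ 0: there Python's ** yields floats, so A's result is not a value of the
-- declared int-list type (B returns the same floats in Python).
def Pre_tipos_de_soma_py (x : List Int) (exp : Int) (maior_exp : Option Int) : Prop :=
  x = [] ∨ exp < 0 ∨ 0 ≤ maior_exp.getD exp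
instance (x : List Int) (exp : Int) (maior_exp : Option Int) : Decidable (Pre_tipos_de_soma_py x exp maior_exp) := by unfold Pre_tipos_de_soma_py; infer_instance
def pvWitness_tipos_de_soma_py : List Int × Int × Option Int := ([1, 2, 3], 2, none)

def Spec_tipos_de_soma_py (x : List Int) (exp : Int) (maior_exp : Option Int) (out : List Int) : Prop := out = tipos_de_soma_py_alt x exp maior_exp
instance (x : List Int) (exp : Int) (maior_exp : Option Int) (out : List Int) : Decidable (Spec_tipos_de_soma_py x exp maior_exp out) := by unfold Spec_tipos_de_soma_py; infer_instance

-- ===== CLAIM (what is proved, stated in full; the proofs are below) =====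
def Claim_equal_tipos_de_soma_py : Prop := ∀ (x : List Int) (exp : Int) (maior_exp : Option Int), Dom_tipos_de_soma_py x exp maior_exp → Pre_tipos_de_soma_py x exp maior_exp → Spec_tipos_de_soma_py x exp maior_exp (tipos_de_soma_py x exp maior_exp)

-- ===== LEMMAS AND PROOFS =====

-- enumerate of a value-map over an enumeration keeps the same indices
theorem pv_enumerate_map_enum {α β : Type} (l : List α) (s : Int) (h : Int × α → β) :
    PySem.List.enumerate ((PySem.List.enumerate l s).map h) s
      = (PySem.List.enumerate l s).map (fun p => (p.1, h p)) := by
  induction l generalizing s with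
  | nil => simp [PySem.List.enumerate_nil]
  | cons a t ih => simp [PySem.List.enumerate_cons, ih]

-- B's outer loop: the accumulator holds, at each index, its start value plus the sum so far
theorem pv_B_fold_char (g : Int → Int → Int) :
    ∀ (xs : List Int) (l : List Int),
      xs.foldl (fun lf xi => (PySem.List.enumerate lf 0).map (fun js => js.2 + g xi js.1)) l
        = (PySem.List.enumerate l 0).map (fun js => js.2 + (xs.map (fun xi => g xi js.1)).sum) := by
  intro xs
  induction xs with
  | nil =>
    intro l
    simp [PySem.List.map_snd_enumerate l 0]
  | cons a t ih =>
    intro l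
    simp only [List.foldl_cons]
    rw [ih, pv_enumerate_map_enum, List.map_map]
    refine List.map_congr_left ?_
    intro p _
    simp [add_assoc]

theorem pv_getD_replicate (n : Nat) (j : Int) :
    PySem.List.pyGetD (List.replicate n (0 : Int)) j 0 = 0 := by
  unfold PySem.List.pyGetD PySem.List.pyGet? PySem.List.pyIdx?
  split_ifs <;> simp [List.getElem?_replicate] <;> split <;> simp

theorem pv_foldl_sum (g : Int → Int) :
    ∀ (xs : List Int) (c : Int), xs.foldl (fun s xi => s + g xi) c = c + (xs.map g).sum := by
  intro xs
  induction xs with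
  | nil => simp
  | cons a t ih => intro c; simp [ih, add_assoc]

-- the row matrix is a map of maps
theorem pv_rows_char (x : List Int) (exp me : Int) :
    pvRowsA x exp me
      = (PySem.List.pyRange 0 (x.length : Int) 1).map (fun i =>
          (PySem.List.pyRange 0 (exp + 1) 1).map (fun j =>
            PySem.List.pyGetD x i 0 ^ me.toNat * PySem.List.pyGetD x i 0 ^ (exp - j).toNat)) := by
  unfold pvRowsA
  refine List.map_congr_left ?_
  intro i _
  simpa using PySem.List.foldl_append_singleton_eq_map
    (fun j => PySem.List.pyGetD x i 0 ^ me.toNat * PySem.List.pyGetD x i 0 ^ (exp - j).toNat)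
    (PySem.List.pyRange 0 (exp + 1) 1) []

theorem tipos_de_soma_py_spec : Claim_equal_tipos_de_soma_py := by
  intro x exp maior_exp _ _
  unfold Spec_tipos_de_soma_py tipos_de_soma_py tipos_de_soma_py_alt
  by_cases hx : x = []
  · subst hx
    simp [pvRowsA, PySem.List.pyRange_zero]
  · have h0 : 0 < x.length := List.length_pos_of_ne_nil hx
    have hN : (0:Int) < (x.length : Int) := by exact_mod_cast h0
    rw [if_neg hx]
    -- B side
    rw [pv_B_fold_char (fun xi j => xi ^ (maior_exp.getD exp).toNat * xi ^ (exp - j).toNat) x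
          (List.replicate (exp + 1).toNat 0),
        PySem.List.enumerate_eq_map_pyRange (List.replicate (exp + 1).toNat (0:Int)) 0,
        List.map_map]
    -- A side
    rw [pv_rows_char]
    have hne : (PySem.List.pyRange 0 (x.length : Int) 1).map (fun i =>
          (PySem.List.pyRange 0 (exp + 1) 1).map (fun j =>
            PySem.List.pyGetD x i 0 ^ (maior_exp.getD exp).toNat * PySem.List.pyGetD x i 0 ^ (exp - j).toNat)) ≠ [] := by
      apply List.ne_nil_of_length_pos
      simp [PySem.List.length_pyRange_one]
      omega
    rw [if_neg hne]
    have hhead : (PySem.List.pyGetD ((PySem.List.pyRange 0 (x.length : Int) 1).map (fun i =>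
          (PySem.List.pyRange 0 (exp + 1) 1).map (fun j =>
            PySem.List.pyGetD x i 0 ^ (maior_exp.getD exp).toNat * PySem.List.pyGetD x i 0 ^ (exp - j).toNat))) 0 []).length
          = (exp + 1).toNat := by
      rw [PySem.List.pyGetD_map_pyRange_of_nonneg _ _ 0 [] le_rfl hN]
      simp [PySem.List.length_pyRange_one]
    rw [hhead]
    rw [PySem.List.foldl_append_singleton_eq_map
          (fun j => (PySem.List.pyRange 0 (((PySem.List.pyRange 0 (x.length : Int) 1).map (fun i =>
              (PySem.List.pyRange 0 (exp + 1) 1).map (fun j' =>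
                PySem.List.pyGetD x i 0 ^ (maior_exp.getD exp).toNat * PySem.List.pyGetD x i 0 ^ (exp - j').toNat))).length : Int) 1).foldl
            (fun soma i =>
              soma + PySem.List.pyGetD (PySem.List.pyGetD ((PySem.List.pyRange 0 (x.length : Int) 1).map (fun i' =>
                (PySem.List.pyRange 0 (exp + 1) 1).map (fun j' =>
                  PySem.List.pyGetD x i' 0 ^ (maior_exp.getD exp).toNat * PySem.List.pyGetD x i' 0 ^ (exp - j').toNat))) i []) j 0) 0)]
    simp only [PySem.List.len_eq, List.length_replicate]
    refine List.map_congr_left ?_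
    intro j hj
    rw [PySem.List.mem_pyRange_one] at hj
    obtain ⟨hj0, hj1⟩ := hj
    have hj1' : j < exp + 1 := by omega
    simp only [Function.comp_apply, pv_getD_replicate, zero_add]
    rw [PySem.List.foldl_pyRange_zero_pyGetD' ((PySem.List.pyRange 0 (x.length : Int) 1).map (fun i' =>
              (PySem.List.pyRange 0 (exp + 1) 1).map (fun j' =>
                PySem.List.pyGetD x i' 0 ^ (maior_exp.getD exp).toNat * PySem.List.pyGetD x i' 0 ^ (exp - j').toNat))) [] (fun soma row => soma + PySem.List.pyGetD row j 0) 0]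
    rw [List.foldl_map]
    simp only [PySem.List.pyGetD_map_pyRange_of_nonneg _ _ _ _ hj0 hj1']
    rw [PySem.List.foldl_pyRange_zero_pyGetD' x 0
          (fun soma xi => soma + xi ^ (maior_exp.getD exp).toNat * xi ^ (exp - j).toNat) 0]
    rw [pv_foldl_sum (fun xi => xi ^ (maior_exp.getD exp).toNat * xi ^ (exp - j).toNat) x 0]
    simp

-- ===== VERDICT (by name: the statement is the Claim_ definition above) =====
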